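-- pv_equiv track=rewrite | github.com/maoqiu888/vibe-lens | backend/app/services/seed_data.py | compute_opposite
-- ===== SOURCE A (Python) =====
-- TAGS = [
--     ("pace", 1, 1,  "慢炖沉浸",   "节奏极慢，像咖啡馆读一下午般从容铺陈"),
--     ("pace", 2, 2,  "张弛有度",   "节奏有呼吸感，快慢交替不让人疲惫"),
--     ("pace", 3, 3,  "紧凑推进",   "节奏密，信息量大，几乎没有留白"),
--     ("pace", 4, 4,  "爆裂快切",   "节奏爆炸，快切刺激停不下来"),
--
--     ("mood", 1, 5,  "治愈温暖",   "整体暖色调，给人抚慰感"),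
--     ("mood", 2, 6,  "明亮轻快",   "基调愉悦，情绪轻盈"),
--     ("mood", 3, 7,  "忧郁内省",   "底色偏冷，带着沉思和怅然"),
--     ("mood", 4, 8,  "黑暗压抑",   "基调阴冷沉重，压得人喘不过气"),
--
--     ("cognition", 1, 9,  "放空友好", "完全不费脑，可以边吃饭边享用"),
--     ("cognition", 2, 10, "轻度思考", "有一点点挑战但不烧脑"),
--     ("cognition", 3, 11, "烧脑解谜", "需要主动推理，有解谜乐趣"),
--     ("cognition", 4, 12, "认知挑战", "抽象度高，需要反复咀嚼"),
--
--     ("narrative", 1, 13, "白描克制", "文笔/镜头克制，点到即止"),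
--     ("narrative", 2, 14, "细腻抒情", "注重情感与细节的层层展开"),
--     ("narrative", 3, 15, "奇观堆砌", "大量视觉/想象奇观，重感官冲击"),
--     ("narrative", 4, 16, "解构实验", "叙事结构非常规，带有实验色彩"),
--
--     ("world", 1, 17, "日常烟火", "日常生活场景为底色"),
--     ("world", 2, 18, "奇幻异想", "架空奇幻或魔法设定"),
--     ("world", 3, 19, "赛博机械", "赛博朋克/机械科幻调性"),
--     ("world", 4, 20, "历史厚重", "有真实历史/年代的厚重感"),
--
--     ("intensity", 1, 21, "轻食小品", "情感投入成本极低，像零食"),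
--     ("intensity", 2, 22, "有共鸣",   "情感适度，能引发共鸣"),
--     ("intensity", 3, 23, "情感重击", "情感浓度高，会被打动甚至流泪"),
--     ("intensity", 4, 24, "灵魂灼烧", "情感极致，会在心里留下烙印"),
-- ]
--
-- def compute_opposite(tag_id: int) -> int:
--     """Within a category: tier 1↔4, tier 2↔3."""
--     for cat, tier, tid, _, _ in TAGS:
--         if tid == tag_id:
--             target_tier = {1: 4, 2: 3, 3: 2, 4: 1}[tier]
--             for c2, t2, tid2, _, _ in TAGS:
--                 if c2 == cat and t2 == target_tier:
--                     return tid2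
--     raise ValueError(f"tag_id {tag_id} not found")
-- ===== SOURCE B (Python) =====
-- def compute_opposite(tag_id: int) -> int:
--     """Within a category: tier 1↔4, tier 2↔3.
--
--     TAGS lays tag ids out sequentially, four per category
--     (tid = 4*cat_index + tier with tier in 1..4), so the opposite-tier
--     id is a closed formula: keep the category block, flip the tier.
--     """
--     if not 1 <= tag_id <= 24:
--         raise ValueError(f"tag_id {tag_id} not found")
--     q, r = divmod(tag_id - 1, 4)
--     return 4 * q + 4 - r
-- ===== Notes on version B (the rewrite author's own statement) =====
-- stated objective: faster
-- what changed: Replaces A's nested O(n^2) rescan of TAGS (outer id search, literal-dict tier flip, inner category/tier scan) with a closed-form O(1) computation exploiting the sequential layout tid = 4*cat_index + tier: range-check the id, then return 4*((tag_id-1)//4) + 4 - (tag_id-1)%4.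
import Mathlib
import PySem

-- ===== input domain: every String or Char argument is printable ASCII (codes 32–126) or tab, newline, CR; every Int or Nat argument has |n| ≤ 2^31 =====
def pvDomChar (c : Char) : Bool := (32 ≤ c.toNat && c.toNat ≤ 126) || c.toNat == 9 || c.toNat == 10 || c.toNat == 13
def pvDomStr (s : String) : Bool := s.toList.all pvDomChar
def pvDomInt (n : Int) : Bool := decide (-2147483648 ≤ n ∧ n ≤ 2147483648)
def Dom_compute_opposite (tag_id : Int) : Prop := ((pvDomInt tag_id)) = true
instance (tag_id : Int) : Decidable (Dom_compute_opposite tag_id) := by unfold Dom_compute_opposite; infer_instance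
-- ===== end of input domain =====

-- B drops the TAGS scans entirely: tids are laid out as tid = 4*cat_index + tier,
-- so the opposite-tier id is the closed formula 4*((tag_id-1)//4) + 4 - (tag_id-1)%4
-- (objective: faster, O(1) arithmetic instead of A's nested rescan).

-- The TAGS constant (category, tier, tid, name, description); names/descriptions are never inspected.
def pvTAGS : List (String × Int × Int × String × String) := [
  ("pace", 1, 1,  "慢炖沉浸",   "节奏极慢，像咖啡馆读一下午般从容铺陈"),
  ("pace", 2, 2,  "张弛有度",   "节奏有呼吸感，快慢交替不让人疲惫"),
  ("pace", 3, 3,  "紧凑推进",   "节奏密，信息量大，几乎没有留白"),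
  ("pace", 4, 4,  "爆裂快切",   "节奏爆炸，快切刺激停不下来"),
  ("mood", 1, 5,  "治愈温暖",   "整体暖色调，给人抚慰感"),
  ("mood", 2, 6,  "明亮轻快",   "基调愉悦，情绪轻盈"),
  ("mood", 3, 7,  "忧郁内省",   "底色偏冷，带着沉思和怅然"),
  ("mood", 4, 8,  "黑暗压抑",   "基调阴冷沉重，压得人喘不过气"),
  ("cognition", 1, 9,  "放空友好", "完全不费脑，可以边吃饭边享用"),
  ("cognition", 2, 10, "轻度思考", "有一点点挑战但不烧脑"),
  ("cognition", 3, 11, "烧脑解谜", "需要主动推理，有解谜乐趣"),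
  ("cognition", 4, 12, "认知挑战", "抽象度高，需要反复咀嚼"),
  ("narrative", 1, 13, "白描克制", "文笔/镜头克制，点到即止"),
  ("narrative", 2, 14, "细腻抒情", "注重情感与细节的层层展开"),
  ("narrative", 3, 15, "奇观堆砌", "大量视觉/想象奇观，重感官冲击"),
  ("narrative", 4, 16, "解构实验", "叙事结构非常规，带有实验色彩"),
  ("world", 1, 17, "日常烟火", "日常生活场景为底色"),
  ("world", 2, 18, "奇幻异想", "架空奇幻或魔法设定"),
  ("world", 3, 19, "赛博机械", "赛博朋克/机械科幻调性"),
  ("world", 4, 20, "历史厚重", "有真实历史/年代的厚重感"),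
  ("intensity", 1, 21, "轻食小品", "情感投入成本极低，像零食"),
  ("intensity", 2, 22, "有共鸣",   "情感适度，能引发共鸣"),
  ("intensity", 3, 23, "情感重击", "情感浓度高，会被打动甚至流泪"),
  ("intensity", 4, 24, "灵魂灼烧", "情感极致，会在心里留下烙印")]

-- ===== PORT A =====
-- inner 'for c2, t2, tid2, _, _ in TAGS: if c2 == cat and t2 == target_tier: return tid2'
def pvInnerA (cat : String) (target_tier : Int) :
    List (String × Int × Int × String × String) → Option Int
  | [] => none
  | (c2, t2, tid2, _, _) :: rest =>
    if c2 = cat ∧ t2 = target_tier then some tid2 else pvInnerA cat target_tier rest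

-- outer loop; on exhaustion Python raises ValueError — outside Pre_, modelled as 0
def pvOuterA (tag_id : Int) : List (String × Int × Int × String × String) → Int
  | [] => 0  -- raise ValueError(f"tag_id {tag_id} not found")
  | (cat, tier, tid, _, _) :: rest =>
    if tid = tag_id then
      -- {1: 4, 2: 3, 3: 2, 4: 1}[tier]; KeyError impossible: every tier in TAGS is 1..4
      let target_tier : Int :=
        (PySem.Dict.get? (PySem.Dict.ofList [(1, 4), (2, 3), (3, 2), (4, 1)]) tier).getD 0
      match pvInnerA cat target_tier pvTAGS with
      | some tid2 => tid2
      | none => pvOuterA tag_id rest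
    else pvOuterA tag_id rest

def compute_opposite (tag_id : Int) : Int := pvOuterA tag_id pvTAGS

-- ===== PORT B =====
-- closed form: range-check, then divmod(tag_id - 1, 4) and 4*q + 4 - r
def compute_opposite_alt (tag_id : Int) : Int :=
  if 1 ≤ tag_id ∧ tag_id ≤ 24 then
    match PySem.Int.divmod? (tag_id - 1) 4 with
    | some (q, r) => 4 * q + 4 - r
    | none => 0  -- unreachable: divisor is 4 ≠ 0
  else 0  -- raise ValueError(f"tag_id {tag_id} not found"); outside Pre_

-- ===== PRECONDITION & SPEC =====
-- Pre_ = exactly the tag ids present in TAGS (1..24); on everything else A raises ValueError.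
def Pre_compute_opposite (tag_id : Int) : Prop := 1 ≤ tag_id ∧ tag_id ≤ 24
instance (tag_id : Int) : Decidable (Pre_compute_opposite tag_id) := by
  unfold Pre_compute_opposite; infer_instance

def pvWitness_compute_opposite : Int := 7

def Spec_compute_opposite (tag_id : Int) (out : Int) : Prop := out = compute_opposite_alt tag_id
instance (tag_id : Int) (out : Int) : Decidable (Spec_compute_opposite tag_id out) := by
  unfold Spec_compute_opposite; infer_instance

-- ===== CLAIM =====
def Claim_equal_compute_opposite : Prop := ∀ (tag_id : Int), Dom_compute_opposite tag_id → Pre_compute_opposite tag_id → Spec_compute_opposite tag_id (compute_opposite tag_id)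

-- ===== LEMMAS AND PROOFS =====

-- ===== VERDICT =====
theorem compute_opposite_spec : Claim_equal_compute_opposite := by
  intro tag_id _ hpre
  unfold Spec_compute_opposite
  obtain ⟨h1, h2⟩ := hpre
  interval_cases tag_id <;> decide
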